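-- pv_equiv track=rewrite | github.com/maschka/arnie | utils.py | convert_dotbracket_to_bp_list
-- ===== SOURCE A (Python) =====
-- def convert_dotbracket_to_bp_list(s):
--     m = {}
--     bp1=[]
--     bp2=[]
--     for i, char in enumerate(s):
--         if char=='(':
--             bp1.append(i)
--         if char==')':
--             bp2.append(i)
--     for i in list(reversed(bp1)):
--         for j in bp2:
--             if j > i:
--                 m[i]=j
--                 m[j]=i
--
--                 bp2.remove(j)
--                 break
--     return m
-- ===== SOURCE B (Python) =====
-- def convert_dotbracket_to_bp_list(s):
--     # Single right-to-left pass: ')' indices go on a stack; each '(' is matched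
--     # with the nearest unmatched ')' to its right, which sits on top of the stack.
--     m = {}
--     stack = []
--     for i, c in reversed(list(enumerate(s))):
--         if c == ')':
--             stack.append(i)
--         elif c == '(' and stack:
--             j = stack.pop()
--             m[i] = j
--             m[j] = i
--     return m
-- ===== Notes on version B (the rewrite author's own statement) =====
-- stated objective: alternative
-- what changed: Replaced A's two-phase matching (collect all open/close paren indices, then for each open paren scan and mutate the close-index list with list.remove) by a single right-to-left pass with a stack of unmatched close-paren indices, popping the nearest one at each open paren.
import Mathlib
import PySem

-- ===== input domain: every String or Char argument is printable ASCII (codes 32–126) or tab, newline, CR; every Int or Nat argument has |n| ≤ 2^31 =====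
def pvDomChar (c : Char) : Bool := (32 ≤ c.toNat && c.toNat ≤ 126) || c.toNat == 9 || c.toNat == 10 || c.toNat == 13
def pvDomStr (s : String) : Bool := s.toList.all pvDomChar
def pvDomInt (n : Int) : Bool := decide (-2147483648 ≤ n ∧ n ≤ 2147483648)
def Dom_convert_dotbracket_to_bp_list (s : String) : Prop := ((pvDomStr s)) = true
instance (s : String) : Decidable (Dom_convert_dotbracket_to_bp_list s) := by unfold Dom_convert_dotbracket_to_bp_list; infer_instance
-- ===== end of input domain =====

-- B replaces A's two-phase scan-and-remove matching by a single right-to-left stack pass (objective: alternative).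

-- ===== PORT A =====
-- first loop: collect indices of '(' into bp1 and of ')' into bp2 (both ascending)
def pvPhase1 : List Char → Int → List Int × List Int → List Int × List Int
  | [], _, acc => acc
  | c :: cs, i, (bp1, bp2) =>
      pvPhase1 cs (i + 1)
        ((if c = '(' then bp1 ++ [i] else bp1), (if c = ')' then bp2 ++ [i] else bp2))

-- inner 'for j in bp2: if j > i: … break' — the first j with j > i
def pvFindGt (i : Int) : List Int → Option Int
  | [] => none
  | j :: rest => if j > i then some j else pvFindGt i rest

-- outer loop over list(reversed(bp1)), mutating m and bp2
def pvOuterA : List Int → List Int → PySem.Dict Int Int → PySem.Dict Int Int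
  | [], _, m => m
  | i :: rest, bp2, m =>
    match pvFindGt i bp2 with
    | none => pvOuterA rest bp2 m
    | some j => pvOuterA rest ((PySem.List.remove? bp2 j).getD bp2) ((m.insert i j).insert j i)

def convert_dotbracket_to_bp_list (s : String) : List (Int × Int) :=
  let p := pvPhase1 s.toList 0 ([], [])
  (pvOuterA p.1.reverse p.2 PySem.Dict.empty).items

-- ===== PORT B =====
-- loop over reversed(list(enumerate(s))); stack top = head ('append'/'pop' at the Python list's end)
def pvGoB : List (Int × Char) → List Int → PySem.Dict Int Int → PySem.Dict Int Int
  | [], _, m => m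
  | (i, c) :: rest, stack, m =>
    if c = ')' then pvGoB rest (i :: stack) m
    else if c = '(' then
      match stack with
      | [] => pvGoB rest stack m
      | j :: stack' => pvGoB rest stack' ((m.insert i j).insert j i)
    else pvGoB rest stack m

def convert_dotbracket_to_bp_list_alt (s : String) : List (Int × Int) :=
  (pvGoB (PySem.List.enumerate s.toList).reverse [] PySem.Dict.empty).items

-- ===== PRECONDITION & SPEC =====
def Spec_convert_dotbracket_to_bp_list (s : String) (out : List (Int × Int)) : Prop := out = convert_dotbracket_to_bp_list_alt s
instance (s : String) (out : List (Int × Int)) : Decidable (Spec_convert_dotbracket_to_bp_list s out) := by unfold Spec_convert_dotbracket_to_bp_list; infer_instance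

-- ===== CLAIM (what is proved, stated in full; the proofs are below) =====
def Claim_equal_convert_dotbracket_to_bp_list : Prop := ∀ (s : String), Dom_convert_dotbracket_to_bp_list s → Spec_convert_dotbracket_to_bp_list s (convert_dotbracket_to_bp_list s)

-- ===== LEMMAS AND PROOFS =====

-- indices of '(' (resp. ')') in cs, counting from i, ascending
def pvOpens : List Char → Int → List Int
  | [], _ => []
  | c :: cs, i => (if c = '(' then [i] else []) ++ pvOpens cs (i + 1)

def pvCloses : List Char → Int → List Int
  | [], _ => []
  | c :: cs, i => (if c = ')' then [i] else []) ++ pvCloses cs (i + 1)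

theorem pvPhase1_eq : ∀ (cs : List Char) (i : Int) (bp1 bp2 : List Int),
    pvPhase1 cs i (bp1, bp2) = (bp1 ++ pvOpens cs i, bp2 ++ pvCloses cs i) := by
  intro cs
  induction cs with
  | nil => intro i bp1 bp2; simp [pvPhase1, pvOpens, pvCloses]
  | cons c cs ih =>
    intro i bp1 bp2
    simp only [pvPhase1, pvOpens, pvCloses, ih]
    split_ifs <;> simp_all

theorem pvOpens_append : ∀ (cs ds : List Char) (i : Int),
    pvOpens (cs ++ ds) i = pvOpens cs i ++ pvOpens ds (i + cs.length) := by
  intro cs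
  induction cs with
  | nil => simp [pvOpens]
  | cons c cs ih =>
    intro ds i
    have h : i + ((c :: cs).length : Int) = (i + 1) + (cs.length : Int) := by
      simp only [List.length_cons]; push_cast; ring
    rw [h]
    simp only [List.cons_append, pvOpens, ih, List.append_assoc]

theorem pvCloses_append : ∀ (cs ds : List Char) (i : Int),
    pvCloses (cs ++ ds) i = pvCloses cs i ++ pvCloses ds (i + cs.length) := by
  intro cs
  induction cs with
  | nil => simp [pvCloses]
  | cons c cs ih =>
    intro ds i
    have h : i + ((c :: cs).length : Int) = (i + 1) + (cs.length : Int) := by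
      simp only [List.length_cons]; push_cast; ring
    rw [h]
    simp only [List.cons_append, pvCloses, ih, List.append_assoc]

theorem pvCloses_lt : ∀ (cs : List Char) (i x : Int), x ∈ pvCloses cs i → x < i + cs.length := by
  intro cs
  induction cs with
  | nil => simp [pvCloses]
  | cons c cs ih =>
    intro i x hx
    simp only [pvCloses, List.mem_append] at hx
    simp only [List.length_cons]
    rcases hx with hx | hx
    · have hxi : x = i := by split_ifs at hx <;> simp_all
      subst hxi; push_cast; omega
    · have := ih (i + 1) x hx
      push_cast at this ⊢; omega

theorem pvFindGt_append_none {i : Int} {xs : List Int} (h : ∀ x ∈ xs, x ≤ i) (ys : List Int) :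
    pvFindGt i (xs ++ ys) = pvFindGt i ys := by
  induction xs with
  | nil => simp
  | cons x xs ih =>
    simp only [List.cons_append, pvFindGt]
    have hx : ¬ x > i := by have := h x (by simp); omega
    simp only [if_neg hx]
    exact ih (fun y hy => h y (by simp [hy]))

theorem pvRemove_append {j : Int} {xs : List Int} (h : j ∉ xs) (ys : List Int) :
    PySem.List.remove? (xs ++ j :: ys) j = some (xs ++ ys) := by
  induction xs with
  | nil => simp
  | cons x xs ih =>
    have hxj : x ≠ j := by intro he; exact h (by simp [he])
    rw [List.cons_append, PySem.List.remove?_cons_of_ne _ hxj,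
      ih (fun hm => h (by simp [hm]))]
    rfl

theorem pvEnum_append : ∀ (cs : List Char) (c : Char) (i : Int),
    PySem.List.enumerate (cs ++ [c]) i = PySem.List.enumerate cs i ++ [((i + cs.length : Int), c)] := by
  intro cs
  induction cs with
  | nil => simp [PySem.List.enumerate_nil, PySem.List.enumerate_cons]
  | cons d cs ih =>
    intro c i
    have h : i + ((d :: cs).length : Int) = (i + 1) + (cs.length : Int) := by
      simp only [List.length_cons]; push_cast; ring
    rw [h]
    simp only [List.cons_append, PySem.List.enumerate_cons, ih]

theorem pvGoB_close (i : Int) (rest : List (Int × Char)) (st : List Int) (m : PySem.Dict Int Int) :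
    pvGoB ((i, ')') :: rest) st m = pvGoB rest (i :: st) m := rfl

theorem pvGoB_open_nil (i : Int) (rest : List (Int × Char)) (m : PySem.Dict Int Int) :
    pvGoB ((i, '(') :: rest) [] m = pvGoB rest [] m := rfl

theorem pvGoB_open_cons (i j : Int) (rest : List (Int × Char)) (st : List Int) (m : PySem.Dict Int Int) :
    pvGoB ((i, '(') :: rest) (j :: st) m = pvGoB rest st ((m.insert i j).insert j i) := rfl

theorem pvGoB_other (i : Int) (c : Char) (rest : List (Int × Char)) (st : List Int)
    (m : PySem.Dict Int Int) (h1 : ¬ c = ')') (h2 : ¬ c = '(') :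
    pvGoB ((i, c) :: rest) st m = pvGoB rest st m := by
  simp [pvGoB, h1, h2]

theorem pvOpens_single_close (x : Int) : pvOpens [')'] x = [] := rfl
theorem pvCloses_single_close (x : Int) : pvCloses [')'] x = [x] := rfl
theorem pvOpens_single_open (x : Int) : pvOpens ['('] x = [x] := rfl
theorem pvCloses_single_open (x : Int) : pvCloses ['('] x = [] := rfl
theorem pvOpens_single_other (c : Char) (x : Int) (h : ¬ c = '(') : pvOpens [c] x = [] := by
  simp [pvOpens, h]
theorem pvCloses_single_other (c : Char) (x : Int) (h : ¬ c = ')') : pvCloses [c] x = [] := by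
  simp [pvCloses, h]

-- the core invariant: the right-to-left stack pass computes exactly A's outer loop,
-- given the stack holds only (still unused) close indices to the right of cs
theorem pvMain : ∀ (cs : List Char) (i : Int) (st : List Int) (m : PySem.Dict Int Int),
    (∀ y ∈ st, i + cs.length ≤ y) →
    pvGoB (PySem.List.enumerate cs i).reverse st m
      = pvOuterA (pvOpens cs i).reverse (pvCloses cs i ++ st) m := by
  intro cs
  induction cs using List.reverseRecOn with
  | nil => intro i st m _; simp [PySem.List.enumerate_nil, pvOpens, pvCloses, pvGoB, pvOuterA]
  | append_singleton cs c ih =>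
    intro i st m hst
    rw [pvEnum_append, pvOpens_append, pvCloses_append, List.reverse_append]
    have hlen : ∀ y ∈ st, i + (cs.length : Int) + 1 ≤ y := by
      intro y hy; have := hst y hy
      simp only [List.length_append, List.length_cons, List.length_nil] at this
      push_cast at this; omega
    have hcl : ∀ x ∈ pvCloses cs i, x ≤ i + (cs.length : Int) := by
      intro x hx; have := pvCloses_lt cs i x hx; omega
    by_cases h1 : c = ')'
    · -- a close paren: B pushes its index; for A it is one more entry at the end of bp2
      subst h1
      simp only [List.reverse_singleton, List.singleton_append, pvGoB_close,
        pvOpens_single_close, pvCloses_single_close, List.append_nil]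
      rw [ih i ((i + (cs.length : Int)) :: st) m
        (by intro y hy
            rcases List.mem_cons.mp hy with h | h
            · omega
            · have := hlen y h; omega)]
      simp [List.append_assoc]
    · by_cases h2 : c = '('
      · subst h2
        simp only [List.reverse_singleton, List.singleton_append,
          pvOpens_single_open, pvCloses_single_open, List.append_nil, List.reverse_append]
        cases st with
        | nil =>
          rw [pvGoB_open_nil, ih i [] m (by simp)]
          simp only [List.append_nil, pvOuterA]
          have hnone : pvFindGt (i + (cs.length : Int)) (pvCloses cs i) = none := by
            rw [← List.append_nil (pvCloses cs i), pvFindGt_append_none hcl]; rfl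
          rw [hnone]
        | cons j st' =>
          have hj : i + (cs.length : Int) < j := by
            have := hlen j (by simp); omega
          rw [pvGoB_open_cons,
            ih i st' ((m.insert (i + (cs.length : Int)) j).insert j (i + (cs.length : Int)))
              (fun y hy => by have := hlen y (by simp [hy]); omega)]
          simp only [pvOuterA]
          rw [pvFindGt_append_none hcl]
          simp only [pvFindGt, if_pos hj]
          have hjn : j ∉ pvCloses cs i := fun hm => absurd (hcl j hm) (by omega)
          rw [pvRemove_append hjn]
          rfl
      · -- any other character: both sides skip it
        simp only [List.reverse_singleton, List.singleton_append, pvGoB_other _ _ _ _ _ h1 h2,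
          pvOpens_single_other _ _ h2, pvCloses_single_other _ _ h1, List.append_nil]
        exact ih i st m (fun y hy => by have := hlen y hy; omega)

-- ===== VERDICT (by name: the statement is the Claim_ definition above) =====
theorem convert_dotbracket_to_bp_list_spec : Claim_equal_convert_dotbracket_to_bp_list := by
  intro s _
  unfold Spec_convert_dotbracket_to_bp_list convert_dotbracket_to_bp_list convert_dotbracket_to_bp_list_alt
  rw [pvPhase1_eq]
  simp only [List.nil_append]
  rw [pvMain s.toList 0 [] PySem.Dict.empty (by simp)]
  simp
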